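-- pv_equiv track=rewrite | github.com/kiwibrowser/src | chrome/common/extensions/docs/server2/link_error_detector.py | StringifyBrokenLinks
-- ===== SOURCE A (Python) =====
-- from itertools import groupby
-- from operator import itemgetter
--
-- def StringifyBrokenLinks(broken_links):
--   '''Prints out broken links in a more readable format.
--   '''
--   def fixed_width(string, width):
--     return "%s%s" % (string, (width - len(string)) * ' ')
--
--   first_col_width = max(len(link[1]) for link in broken_links)
--   second_col_width = max(len(link[2]) for link in broken_links)
--   target = itemgetter(2)
--   output = []
--
--   def pretty_print(link, col_offset=0):
--     return "%s -> %s %s" % (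
--         fixed_width(link[1], first_col_width - col_offset),
--         fixed_width(link[2], second_col_width),
--         link[3])
--
--   for target, links in groupby(sorted(broken_links, key=target), target):
--     links = list(links)
--     # Compress messages
--     if len(links) > 50 and not links[0][2].startswith('#'):
--       message = "Found %d broken links (" % len(links)
--       output.append("%s%s)" % (message, pretty_print(links[0], len(message))))
--     else:
--       for link in links:
--         output.append(pretty_print(link))
--
--   return '\n'.join(output)
-- ===== SOURCE B (Python) =====
-- def StringifyBrokenLinks(broken_links):
--   '''Prints out broken links in a more readable format.
--   '''
--   first_col_width = max(len(link[1]) for link in broken_links)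
--   second_col_width = max(len(link[2]) for link in broken_links)
--
--   # Counting pass: how many links point at each target.
--   counts = {}
--   for link in broken_links:
--     counts[link[2]] = counts.get(link[2], 0) + 1
--
--   def line(link, col_offset=0):
--     name = link[1] + ' ' * (first_col_width - col_offset - len(link[1]))
--     tgt = link[2] + ' ' * (second_col_width - len(link[2]))
--     return '%s -> %s %s' % (name, tgt, link[3])
--
--   # Flat per-row pass over the stably sorted rows: each row alone decides
--   # what it contributes, driven by the precomputed counts.
--   lines = []
--   emitted = set()
--   for link in sorted(broken_links, key=lambda l: l[2]):
--     t = link[2]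
--     if counts[t] > 50 and not t.startswith('#'):
--       if t not in emitted:
--         emitted.add(t)
--         message = 'Found %d broken links (' % counts[t]
--         lines.append(message + line(link, len(message)) + ')')
--     else:
--       lines.append(line(link))
--   return '\n'.join(lines)
-- ===== Notes on version B (the rewrite author's own statement) =====
-- stated objective: alternative
-- what changed: Replaces sort+itertools.groupby with grouped emission by a counting pass (a Counter of targets) followed by one flat per-row pass over the stably sorted rows in which each row alone decides to emit its line, emit the compressed header on the first sight of an over-50 target, or emit nothing; no group lists are ever materialised.
-- outside the precondition, e.g. on StringifyBrokenLinks([]): A raises ValueError, B raises ValueError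
import Mathlib
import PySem

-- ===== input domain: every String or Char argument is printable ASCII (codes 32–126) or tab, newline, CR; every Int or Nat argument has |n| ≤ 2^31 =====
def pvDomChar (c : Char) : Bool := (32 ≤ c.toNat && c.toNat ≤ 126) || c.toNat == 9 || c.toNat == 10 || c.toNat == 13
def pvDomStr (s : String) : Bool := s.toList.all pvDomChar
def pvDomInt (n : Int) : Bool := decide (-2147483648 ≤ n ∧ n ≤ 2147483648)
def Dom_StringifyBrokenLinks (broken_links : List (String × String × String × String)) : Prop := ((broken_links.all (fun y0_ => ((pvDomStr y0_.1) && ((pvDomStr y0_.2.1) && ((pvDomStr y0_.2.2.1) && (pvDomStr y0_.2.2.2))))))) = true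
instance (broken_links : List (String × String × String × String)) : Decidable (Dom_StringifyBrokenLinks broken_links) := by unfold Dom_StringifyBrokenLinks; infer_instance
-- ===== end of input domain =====

-- B replaces sort+groupby by a counting pass plus one flat per-row pass over the sorted rows (alternative decomposition; return value only, no mutation).

-- ===== PORT A =====
def pvFixedA (s : String) (width : Int) : String :=
  s ++ String.ofList (List.replicate (width - PySem.Str.len s).toNat ' ')

def pvPrettyA (fcw scw : Int) (link : String × String × String × String) (col_offset : Int) : String :=
  pvFixedA link.2.1 (fcw - col_offset) ++ " -> " ++ pvFixedA link.2.2.1 scw ++ " " ++ link.2.2.2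

-- itertools.groupby over the sorted list: consecutive runs of equal keys
def pvGroupbyA : List (String × String × String × String) → List (String × List (String × String × String × String))
  | [] => []
  | x :: xs =>
    (x.2.2.1, x :: xs.takeWhile (fun y => y.2.2.1 == x.2.2.1)) ::
      pvGroupbyA (xs.dropWhile (fun y => y.2.2.1 == x.2.2.1))
termination_by l => l.length
decreasing_by simpa using Nat.lt_succ_of_le (List.length_dropWhile_le _ _)

def pvEmitA (fcw scw : Int) (links : List (String × String × String × String)) : List String :=
  if PySem.List.len links > 50 &&
      !(PySem.Str.startswith (PySem.List.pyGetD links 0 ("", "", "", "")).2.2.1 "#") then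
    let message := "Found " ++ PySem.Int.toStr (PySem.List.len links) ++ " broken links ("
    [message ++ pvPrettyA fcw scw (PySem.List.pyGetD links 0 ("", "", "", "")) (PySem.Str.len message) ++ ")"]
  else
    links.map (fun link => pvPrettyA fcw scw link 0)

def StringifyBrokenLinks (broken_links : List (String × String × String × String)) : String :=
  let fcw := (PySem.List.max? (broken_links.map (fun l => PySem.Str.len l.2.1)) (fun x => x)).getD 0
  let scw := (PySem.List.max? (broken_links.map (fun l => PySem.Str.len l.2.2.1)) (fun x => x)).getD 0
  let groups := pvGroupbyA (PySem.List.sorted broken_links (fun l => l.2.2.1))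
  let output := groups.foldl (fun out g => out ++ pvEmitA fcw scw g.2) []
  PySem.Str.join "\n" output

-- ===== PORT B =====
-- line(link, col_offset): fixed_width inlined by concatenation (negative repeat = '')
def pvLineB (fcw scw : Int) (link : String × String × String × String) (col_offset : Int) : String :=
  (link.2.1 ++ String.ofList (List.replicate (fcw - col_offset - PySem.Str.len link.2.1).toNat ' '))
    ++ " -> "
    ++ (link.2.2.1 ++ String.ofList (List.replicate (scw - PySem.Str.len link.2.2.1).toNat ' '))
    ++ " " ++ link.2.2.2

-- the body of B's flat per-row loop (state: lines so far, set of already-emitted compressed targets)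
def pvStepB (counts : PySem.Dict String Int) (fcw scw : Int)
    (st : List String × PySem.Set String) (link : String × String × String × String) :
    List String × PySem.Set String :=
  let t := link.2.2.1
  if counts.getD t 0 > 50 && !(PySem.Str.startswith t "#") then
    if PySem.Set.contains st.2 t then st
    else
      let message := "Found " ++ PySem.Int.toStr (counts.getD t 0) ++ " broken links ("
      (st.1 ++ [message ++ pvLineB fcw scw link (PySem.Str.len message) ++ ")"],
        PySem.Set.add st.2 t)
  else
    (st.1 ++ [pvLineB fcw scw link 0], st.2)

def StringifyBrokenLinks_alt (broken_links : List (String × String × String × String)) : String :=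
  let fcw := (PySem.List.max? (broken_links.map (fun l => PySem.Str.len l.2.1)) (fun x => x)).getD 0
  let scw := (PySem.List.max? (broken_links.map (fun l => PySem.Str.len l.2.2.1)) (fun x => x)).getD 0
  let counts := broken_links.foldl
    (fun d l => d.insert l.2.2.1 (d.getD l.2.2.1 0 + 1)) (PySem.Dict.empty : PySem.Dict String Int)
  let st := (PySem.List.sorted broken_links (fun l => l.2.2.1)).foldl
    (pvStepB counts fcw scw) ([], PySem.Set.empty)
  PySem.Str.join "\n" st.1

-- ===== PRECONDITION & SPEC =====
-- Python A raises ValueError (max() of an empty sequence) on []; Pre_ excludes exactly that.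
def Pre_StringifyBrokenLinks (broken_links : List (String × String × String × String)) : Prop :=
  broken_links ≠ []
instance (broken_links : List (String × String × String × String)) : Decidable (Pre_StringifyBrokenLinks broken_links) := by unfold Pre_StringifyBrokenLinks; infer_instance
def pvWitness_StringifyBrokenLinks : (List (String × String × String × String)) :=
  [("p", "a.html", "t.html", "ln 3")]

def Spec_StringifyBrokenLinks (broken_links : List (String × String × String × String)) (out : String) : Prop := out = StringifyBrokenLinks_alt broken_links
instance (broken_links : List (String × String × String × String)) (out : String) : Decidable (Spec_StringifyBrokenLinks broken_links out) := by unfold Spec_StringifyBrokenLinks; infer_instance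

-- ===== CLAIM (what is proved, stated in full; the proofs are below) =====
def Claim_equal_StringifyBrokenLinks : Prop := ∀ (broken_links : List (String × String × String × String)), Dom_StringifyBrokenLinks broken_links → Pre_StringifyBrokenLinks broken_links → Spec_StringifyBrokenLinks broken_links (StringifyBrokenLinks broken_links)

-- ===== LEMMAS AND PROOFS =====

theorem filter_insertBy_pos {α : Type} (key : α → String) (k : String) (x : α) (ys : List α)
    (hx : key x = k) (hs : ys.Pairwise (fun a b => key a ≤ key b)) :
    (PySem.List.insertBy (fun a b => decide (key a < key b)) x ys).filter (fun y => key y == k)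
      = ys.filter (fun y => key y == k) ++ [x] := by
  induction ys with
  | nil => simp [PySem.List.insertBy, hx]
  | cons y ys ih =>
    rw [PySem.List.insertBy]
    by_cases hb : key x < key y
    · rw [decide_eq_true hb, if_pos rfl]
      have hnil : ∀ z ∈ y :: ys, ¬ key z = k := by
        intro z hz hzk
        rcases List.mem_cons.mp hz with rfl | hz'
        · rw [hx, hzk] at hb; exact absurd hb (lt_irrefl _)
        · have := (List.pairwise_cons.mp hs).1 z hz'
          rw [hzk, ← hx] at this
          exact absurd (lt_of_lt_of_le hb this) (lt_irrefl _)
      have : (y :: ys).filter (fun z => key z == k) = [] := by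
        rw [List.filter_eq_nil_iff]
        intro z hz; simpa using hnil z hz
      rw [List.filter_cons]
      simp only [show (key x == k) = true from by simp [hx]]
      rw [this]
      simp
    · rw [decide_eq_false hb, if_neg (by simp), List.filter_cons,
        ih (List.pairwise_cons.mp hs).2, List.filter_cons]
      by_cases hy : key y = k <;> simp [hy]

theorem filter_insertBy_neg {α : Type} (key : α → String) (k : String) (x : α) (ys : List α)
    (hx : ¬ key x = k) :
    (PySem.List.insertBy (fun a b => decide (key a < key b)) x ys).filter (fun y => key y == k)
      = ys.filter (fun y => key y == k) := by
  induction ys with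
  | nil => simp [PySem.List.insertBy, hx]
  | cons y ys ih =>
    rw [PySem.List.insertBy]
    by_cases hb : key x < key y
    · rw [decide_eq_true hb, if_pos rfl]
      simp [List.filter_cons, hx]
    · rw [decide_eq_false hb, if_neg (by simp)]
      simp only [List.filter_cons]
      rw [ih]

theorem filter_sorted {α : Type} (key : α → String) (k : String) (xs : List α) :
    (PySem.List.sorted xs key).filter (fun y => key y == k) = xs.filter (fun y => key y == k) := by
  rw [PySem.List.sorted_eq_foldl_insertBy]
  suffices h : ∀ acc : List α, acc.Pairwise (fun a b => key a ≤ key b) →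
      (xs.foldl (fun acc x => PySem.List.insertBy (fun a b => decide (key a < key b)) x acc) acc).filter (fun y => key y == k)
      = acc.filter (fun y => key y == k) ++ xs.filter (fun y => key y == k) by
    simpa using h [] (by simp)
  induction xs with
  | nil => intro acc _; simp
  | cons x xs ih =>
    intro acc hacc
    rw [List.foldl_cons, ih _ (PySem.List.insertBy_pairwise_le key x acc hacc)]
    by_cases hx : key x = k
    · rw [filter_insertBy_pos key k x acc hx hacc]
      simp [hx]
    · rw [filter_insertBy_neg key k x acc hx]
      simp [hx]

-- all elements after the first run have strictly larger key (sorted input)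
theorem pvRestGt (x : String × String × String × String) (xs : List (String × String × String × String))
    (hs : (x :: xs).Pairwise (fun a b => a.2.2.1 ≤ b.2.2.1)) :
    ∀ z ∈ xs.dropWhile (fun y => y.2.2.1 == x.2.2.1), x.2.2.1 < z.2.2.1 := by
  intro z hz
  set rest := xs.dropWhile (fun y => y.2.2.1 == x.2.2.1) with hrest
  have hsub : rest.Sublist xs := List.dropWhile_sublist _
  have hxle : ∀ w ∈ xs, x.2.2.1 ≤ w.2.2.1 := (List.pairwise_cons.mp hs).1
  have hrp : rest.Pairwise (fun a b => a.2.2.1 ≤ b.2.2.1) :=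
    ((List.pairwise_cons.mp hs).2).sublist hsub
  match hR : rest with
  | [] => simp [hR] at hz
  | r :: rs =>
    have h0 : xs.dropWhile (fun y => y.2.2.1 == x.2.2.1) = r :: rs := hrest ▸ hR
    have hne : ¬ (r.2.2.1 == x.2.2.1) = true := by
      have h1 := List.head_dropWhile_not (fun y => y.2.2.1 == x.2.2.1) (l := xs) (by simp [h0])
      simp only [h0, List.head_cons] at h1
      simp [h1]
    have hrx : x.2.2.1 < r.2.2.1 := by
      have hle : x.2.2.1 ≤ r.2.2.1 := hxle r (hsub.mem (by simp [hR]))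
      rcases lt_or_eq_of_le hle with h | h
      · exact h
      · exact absurd (by simp [h.symm]) hne
    rcases List.mem_cons.mp (hR ▸ hz) with rfl | hz'
    · exact hrx
    · have := (List.pairwise_cons.mp (hR ▸ hrp)).1 z hz'
      exact lt_of_lt_of_le hrx this

-- the first run of a sorted list is exactly its filter by the head key
theorem pvRunFilter (x : String × String × String × String) (xs : List (String × String × String × String))
    (hs : (x :: xs).Pairwise (fun a b => a.2.2.1 ≤ b.2.2.1)) :
    (x :: xs).filter (fun y => y.2.2.1 == x.2.2.1)
      = x :: xs.takeWhile (fun y => y.2.2.1 == x.2.2.1) := by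
  rw [List.filter_cons, if_pos (by simp)]
  congr 1
  conv_lhs => rw [← List.takeWhile_append_dropWhile (p := fun y => y.2.2.1 == x.2.2.1) (l := xs)]
  rw [List.filter_append]
  have h1 : (xs.takeWhile (fun y => y.2.2.1 == x.2.2.1)).filter (fun y => y.2.2.1 == x.2.2.1)
      = xs.takeWhile (fun y => y.2.2.1 == x.2.2.1) :=
    List.filter_eq_self.mpr (fun a ha => List.mem_takeWhile_imp (p := fun y : String × String × String × String => y.2.2.1 == x.2.2.1) ha)
  have h2 : (xs.dropWhile (fun y => y.2.2.1 == x.2.2.1)).filter (fun y => y.2.2.1 == x.2.2.1) = [] := by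
    rw [List.filter_eq_nil_iff]
    intro z hz
    have := pvRestGt x xs hs z hz
    simp only [beq_iff_eq]
    exact fun h => absurd (h ▸ this) (lt_irrefl _)
  rw [h1, h2, List.append_nil]

-- Set/step helper facts
theorem pvContainsAddSelf (s : PySem.Set String) (t : String) :
    PySem.Set.contains (PySem.Set.add s t) t = true := by
  simp [PySem.Set.add, PySem.Set.contains]
  split <;> simp_all

theorem pvContainsAddNe (s : PySem.Set String) (t y : String) (hy : y ≠ t)
    (hs : PySem.Set.contains s y = false) :
    PySem.Set.contains (PySem.Set.add s t) y = false := by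
  simp only [PySem.Set.add]
  split
  · exact hs
  · simp_all [PySem.Set.contains]

theorem pvStepB_pos (counts : PySem.Dict String Int) (fcw scw : Int)
    (st : List String × PySem.Set String) (link : String × String × String × String)
    (hc : (counts.getD link.2.2.1 0 > 50 && !(PySem.Str.startswith link.2.2.1 "#")) = true)
    (hn : PySem.Set.contains st.2 link.2.2.1 = false) :
    pvStepB counts fcw scw st link =
      (st.1 ++ [("Found " ++ PySem.Int.toStr (counts.getD link.2.2.1 0) ++ " broken links (")
        ++ pvLineB fcw scw link
            (PySem.Str.len ("Found " ++ PySem.Int.toStr (counts.getD link.2.2.1 0) ++ " broken links (")) ++ ")"],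
       PySem.Set.add st.2 link.2.2.1) := by
  simp at hc hn
  simp [pvStepB, hc, hn]

theorem pvStepB_skip (counts : PySem.Dict String Int) (fcw scw : Int)
    (st : List String × PySem.Set String) (link : String × String × String × String)
    (hc : (counts.getD link.2.2.1 0 > 50 && !(PySem.Str.startswith link.2.2.1 "#")) = true)
    (hn : PySem.Set.contains st.2 link.2.2.1 = true) :
    pvStepB counts fcw scw st link = st := by
  simp at hc hn
  simp [pvStepB, hc, hn]

theorem pvStepB_line (counts : PySem.Dict String Int) (fcw scw : Int)
    (st : List String × PySem.Set String) (link : String × String × String × String)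
    (hc : ¬ (counts.getD link.2.2.1 0 > 50 && !(PySem.Str.startswith link.2.2.1 "#")) = true) :
    pvStepB counts fcw scw st link = (st.1 ++ [pvLineB fcw scw link 0], st.2) := by
  simp at hc
  simp [pvStepB]
  intro h1 h2
  exact absurd (hc h1) (by simp [h2])

-- folding B's step over a run tail whose target is already emitted does nothing
theorem pvFoldSkip (counts : PySem.Dict String Int) (fcw scw : Int) (t : String)
    (l : List (String × String × String × String)) (st : List String × PySem.Set String)
    (hk : ∀ z ∈ l, z.2.2.1 = t)
    (hc : (counts.getD t 0 > 50 && !(PySem.Str.startswith t "#")) = true)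
    (hin : PySem.Set.contains st.2 t = true) :
    l.foldl (pvStepB counts fcw scw) st = st := by
  induction l generalizing st with
  | nil => rfl
  | cons z l ih =>
    have hz : z.2.2.1 = t := hk z (by simp)
    rw [List.foldl_cons, pvStepB_skip counts fcw scw st z (by rw [hz]; exact hc) (by rw [hz]; exact hin)]
    exact ih st (fun w hw => hk w (by simp [hw])) hin

-- folding B's step over a run whose condition is false appends one line per row
theorem pvFoldPlain (counts : PySem.Dict String Int) (fcw scw : Int) (t : String)
    (l : List (String × String × String × String)) (st : List String × PySem.Set String)
    (hk : ∀ z ∈ l, z.2.2.1 = t)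
    (hc : ¬ (counts.getD t 0 > 50 && !(PySem.Str.startswith t "#")) = true) :
    l.foldl (pvStepB counts fcw scw) st
      = (st.1 ++ l.map (fun link => pvLineB fcw scw link 0), st.2) := by
  induction l generalizing st with
  | nil => simp
  | cons z l ih =>
    have hz : z.2.2.1 = t := hk z (by simp)
    rw [List.foldl_cons, pvStepB_line counts fcw scw st z (by rw [hz]; exact hc),
      ih _ (fun w hw => hk w (by simp [hw]))]
    simp

-- KEY LEMMA: B's flat fold over a sorted list equals A's group-wise emission
theorem pvFlatEqGroups (counts : PySem.Dict String Int) (fcw scw : Int)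
    (s : List (String × String × String × String)) (out : List String) (seen : PySem.Set String)
    (hs : s.Pairwise (fun a b => a.2.2.1 ≤ b.2.2.1))
    (hseen : ∀ z ∈ s, PySem.Set.contains seen z.2.2.1 = false)
    (hcnt : ∀ z ∈ s, counts.getD z.2.2.1 0
        = ((s.filter (fun y => y.2.2.1 == z.2.2.1)).length : Int)) :
    (s.foldl (pvStepB counts fcw scw) (out, seen)).1
      = (pvGroupbyA s).foldl (fun o g => o ++ pvEmitA fcw scw g.2) out := by
  induction s using pvGroupbyA.induct generalizing out seen with
  | case1 => simp [pvGroupbyA]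
  | case2 x xs ih =>
    set t := x.2.2.1 with ht
    set run := x :: xs.takeWhile (fun y => y.2.2.1 == t) with hrun
    set rest := xs.dropWhile (fun y => y.2.2.1 == t) with hrest
    have hsplit : x :: xs = run ++ rest := by
      rw [hrun, hrest]; simp [List.takeWhile_append_dropWhile]
    have hrunk : ∀ z ∈ run, z.2.2.1 = t := by
      intro z hz
      rcases List.mem_cons.mp (hrun ▸ hz) with rfl | hz'
      · rfl
      · simpa using List.mem_takeWhile_imp hz'
    have hrestmem : ∀ z ∈ rest, z ∈ x :: xs := by
      intro z hz
      exact List.mem_cons_of_mem _ ((List.dropWhile_sublist _).mem hz)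
    have hgt : ∀ z ∈ rest, t < z.2.2.1 := pvRestGt x xs hs
    have hrests : rest.Pairwise (fun a b => a.2.2.1 ≤ b.2.2.1) :=
      ((List.pairwise_cons.mp hs).2).sublist (List.dropWhile_sublist _)
    have hfilt : ∀ z ∈ rest, (x :: xs).filter (fun y => y.2.2.1 == z.2.2.1)
        = rest.filter (fun y => y.2.2.1 == z.2.2.1) := by
      intro z hz
      conv_lhs => rw [hsplit]
      rw [List.filter_append]
      have : run.filter (fun y => y.2.2.1 == z.2.2.1) = [] := by
        rw [List.filter_eq_nil_iff]
        intro w hw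
        have hwt : w.2.2.1 = t := hrunk w hw
        simp only [beq_iff_eq, hwt]
        exact fun h => absurd (h ▸ hgt z hz) (lt_irrefl _)
      rw [this, List.nil_append]
    have hcntrest : ∀ z ∈ rest, counts.getD z.2.2.1 0
        = ((rest.filter (fun y => y.2.2.1 == z.2.2.1)).length : Int) := by
      intro z hz
      rw [hcnt z (hrestmem z hz), hfilt z hz]
    have hcx : counts.getD t 0 = ((run.length : Nat) : Int) := by
      rw [hcnt x (by simp), ← ht, pvRunFilter x xs hs, ← hrun]
    have hhead : PySem.List.pyGetD run 0 ("", "", "", "") = x := by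
      rw [hrun]; simp [PySem.List.pyGetD]
    have hlen : PySem.List.len run = ((run.length : Nat) : Int) := rfl
    have hBA : (counts.getD t 0 > 50 && !(PySem.Str.startswith t "#"))
        = (PySem.List.len run > 50 &&
            !(PySem.Str.startswith (PySem.List.pyGetD run 0 ("", "", "", "")).2.2.1 "#")) := by
      rw [hcx, hhead, ← ht]; rfl
    conv_lhs => rw [hsplit, List.foldl_append]
    conv_rhs => rw [pvGroupbyA, List.foldl_cons]
    dsimp only
    rw [← ht, ← hrun, ← hrest]
    by_cases hcond : ((counts.getD t 0 > 50 && !(PySem.Str.startswith t "#")) = true)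
    · -- compressed run
      have hrunfold : run.foldl (pvStepB counts fcw scw) (out, seen)
          = (out ++ pvEmitA fcw scw run, PySem.Set.add seen t) := by
        rw [hrun, List.foldl_cons,
          pvStepB_pos counts fcw scw (out, seen) x (by rw [← ht]; exact hcond)
            (by rw [← ht]; exact hseen x (by simp)),
          pvFoldSkip counts fcw scw t _ _
            (fun w hw => by simpa using List.mem_takeWhile_imp hw) hcond
            (pvContainsAddSelf seen t)]
      -- identify the emitted string with pvEmitA
        unfold pvEmitA
        rw [if_pos (by rw [← hBA]; exact hcond), hhead]
        rw [hcx, hlen, ht]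
        rfl
      rw [hrunfold]
      rw [ih (out ++ pvEmitA fcw scw run) (PySem.Set.add seen t) hrests
        (fun z hz => pvContainsAddNe seen t z.2.2.1 (fun h => absurd (h ▸ hgt z hz) (lt_irrefl _))
          (hseen z (hrestmem z hz)))
        hcntrest]
    · -- plain run
      have hrunfold : run.foldl (pvStepB counts fcw scw) (out, seen)
          = (out ++ pvEmitA fcw scw run, seen) := by
        rw [pvFoldPlain counts fcw scw t run (out, seen) hrunk hcond]
        unfold pvEmitA
        rw [if_neg (by rw [← hBA]; exact hcond)]
        rfl
      rw [hrunfold]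
      exact ih (out ++ pvEmitA fcw scw run) seen hrests
        (fun z hz => hseen z (hrestmem z hz)) hcntrest

theorem pvCounts (bl : List (String × String × String × String)) (k : String) :
    (bl.foldl (fun d l => d.insert l.2.2.1 (d.getD l.2.2.1 0 + 1)) (PySem.Dict.empty : PySem.Dict String Int)).getD k 0
      = ((bl.filter (fun y => y.2.2.1 == k)).length : Int) := by
  have h1 : bl.foldl (fun d l => d.insert l.2.2.1 (d.getD l.2.2.1 0 + 1)) (PySem.Dict.empty : PySem.Dict String Int)
      = (bl.map (fun l => l.2.2.1)).foldl (fun d x => d.insert x (d.getD x 0 + 1)) (PySem.Dict.empty : PySem.Dict String Int) := by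
    rw [List.foldl_map]
  rw [h1, PySem.Dict.foldl_insert_getD_add_one_eq_counter, PySem.Dict.getD_counter]
  congr 1
  rw [List.count_eq_countP, List.countP_map, List.countP_eq_length_filter]
  rfl

theorem pvMain (bl : List (String × String × String × String)) :
    StringifyBrokenLinks bl = StringifyBrokenLinks_alt bl := by
  unfold StringifyBrokenLinks StringifyBrokenLinks_alt
  dsimp only
  set fcw := (PySem.List.max? (bl.map (fun l => PySem.Str.len l.2.1)) (fun x => x)).getD 0
  set scw := (PySem.List.max? (bl.map (fun l => PySem.Str.len l.2.2.1)) (fun x => x)).getD 0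
  set counts := bl.foldl (fun d l => d.insert l.2.2.1 (d.getD l.2.2.1 0 + 1)) (PySem.Dict.empty : PySem.Dict String Int) with hcounts
  set s := PySem.List.sorted bl (fun l => l.2.2.1) with hsdef
  have hsort : s.Pairwise (fun a b => a.2.2.1 ≤ b.2.2.1) :=
    PySem.List.sorted_pairwise bl (fun l => l.2.2.1)
  have hkey := pvFlatEqGroups counts fcw scw s [] PySem.Set.empty hsort
    (fun z _ => rfl)
    (fun z _ => by
      rw [hcounts, pvCounts bl z.2.2.1, hsdef, filter_sorted (fun l => l.2.2.1) z.2.2.1 bl])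
  rw [← hkey]

-- ===== VERDICT (by name: the statement is the Claim_ definition above) =====
theorem StringifyBrokenLinks_spec : Claim_equal_StringifyBrokenLinks := by
  intro bl _ _
  unfold Spec_StringifyBrokenLinks
  exact pvMain bl
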